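-- pv_equiv track=rewrite | github.com/Lexi-jh/rose_lab | ros/src/dummy/dummy/dummy_service.py | _topics_from_sensors
-- ===== SOURCE A (Python) =====
-- def _topics_from_sensors(sensors):
--     topic_map = {
--         'lidar': 'points',
--         'points': 'points',
--         'gantry_lidar': 'points',
--     }
--     topics = []
--     for sensor in sensors:
--         topic = topic_map.get(sensor.lower()) if isinstance(sensor, str) else None
--         if topic:
--             topics.append(topic)
--     return list(dict.fromkeys(topics))
-- ===== SOURCE B (Python) =====
-- def _topics_from_sensors(sensors):
--     for sensor in sensors:
--         if isinstance(sensor, str) and sensor.lower() in ('lidar', 'points', 'gantry_lidar'):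
--             return ['points']
--     return []
-- ===== Notes on version B (the rewrite author's own statement) =====
-- stated objective: simpler
-- what changed: Every mapped value is the same topic string, so B replaces A's list-building plus dict.fromkeys dedup with a single early-return existence scan over the sensors.
import Mathlib
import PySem

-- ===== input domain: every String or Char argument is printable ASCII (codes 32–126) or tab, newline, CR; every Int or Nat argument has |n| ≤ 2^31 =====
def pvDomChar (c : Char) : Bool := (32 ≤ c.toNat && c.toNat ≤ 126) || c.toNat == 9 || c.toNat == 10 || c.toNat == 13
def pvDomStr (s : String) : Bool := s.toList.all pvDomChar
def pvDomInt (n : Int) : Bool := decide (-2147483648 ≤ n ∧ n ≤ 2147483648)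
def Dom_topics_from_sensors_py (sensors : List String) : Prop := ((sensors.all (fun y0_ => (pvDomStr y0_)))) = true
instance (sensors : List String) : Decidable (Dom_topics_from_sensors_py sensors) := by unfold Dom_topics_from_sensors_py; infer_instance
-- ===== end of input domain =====

-- B replaces A's list-building + dict.fromkeys dedup with an early-return existence scan (simpler); return value only.

-- ===== PORT A =====
-- topic_map literal; 'isinstance(sensor, str)' is always true under the type convention (sensors : List String)
def topics_from_sensors_py (sensors : List String) : List String :=
  let topic_map : PySem.Dict String String :=
    PySem.Dict.ofList [("lidar", "points"), ("points", "points"), ("gantry_lidar", "points")]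
  let topics := sensors.foldl (fun topics sensor =>
    match topic_map.get? (PySem.Str.lower sensor) with
    | some topic => if topic ≠ "" then topics ++ [topic] else topics  -- 'if topic:' truthiness
    | none => topics) []
  PySem.List.dedup topics

-- ===== PORT B =====
-- early-return 'for' loop that only tests existence = List.any
def topics_from_sensors_py_alt (sensors : List String) : List String :=
  if sensors.any (fun sensor =>
      ["lidar", "points", "gantry_lidar"].contains (PySem.Str.lower sensor))
  then ["points"] else []

-- ===== PRECONDITION & SPEC =====
def Spec_topics_from_sensors_py (sensors : List String) (out : List String) : Prop := out = topics_from_sensors_py_alt sensors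
instance (sensors : List String) (out : List String) : Decidable (Spec_topics_from_sensors_py sensors out) := by unfold Spec_topics_from_sensors_py; infer_instance

-- ===== CLAIM (what is proved, stated in full; the proofs are below) =====
def Claim_equal_topics_from_sensors_py : Prop := ∀ (sensors : List String), Dom_topics_from_sensors_py sensors → Spec_topics_from_sensors_py sensors (topics_from_sensors_py sensors)

-- ===== LEMMAS AND PROOFS =====

def pvQ (s : String) : Bool := ["lidar", "points", "gantry_lidar"].contains (PySem.Str.lower s)

theorem pvDictLit : PySem.Dict.ofList [("lidar", "points"), ("points", "points"), ("gantry_lidar", "points")]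
    = PySem.Dict.mk [("lidar", "points"), ("points", "points"), ("gantry_lidar", "points")] := by decide

theorem pvGetLit (k : String) :
    (PySem.Dict.ofList [("lidar", "points"), ("points", "points"), ("gantry_lidar", "points")]).get? k
    = if k = "lidar" ∨ k = "points" ∨ k = "gantry_lidar" then some "points" else none := by
  rw [pvDictLit]
  by_cases h1 : k = "lidar" <;> by_cases h2 : k = "points" <;> by_cases h3 : k = "gantry_lidar" <;>
    simp [h1, h2, h3, PySem.Dict.get?]
  exact ⟨fun h => h1 h.symm, fun h => h2 h.symm, fun h => h3 h.symm⟩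

theorem pvStepA_eq (acc : List String) (s : String) :
    (match (PySem.Dict.ofList [("lidar", "points"), ("points", "points"), ("gantry_lidar", "points")]).get? (PySem.Str.lower s) with
     | some topic => if topic ≠ "" then acc ++ [topic] else acc
     | none => acc)
    = if pvQ s then acc ++ ["points"] else acc := by
  rw [pvGetLit]
  by_cases h : PySem.Str.lower s = "lidar" ∨ PySem.Str.lower s = "points" ∨ PySem.Str.lower s = "gantry_lidar" <;>
    simp [h, pvQ]

theorem pvFoldB (l : List String) (acc : List String) :
    l.foldl (fun acc s => if pvQ s then acc ++ ["points"] else acc) acc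
      = acc ++ List.replicate (l.countP pvQ) "points" := by
  induction l generalizing acc with
  | nil => simp
  | cons x xs ih =>
    by_cases h : pvQ x <;>
      simp [h, ih, List.replicate_succ]

theorem pvSetAux (m : Nat) :
    List.foldl PySem.Set.add ["points"] (List.replicate m "points") = ["points"] := by
  induction m with
  | zero => rfl
  | succ k ih => simpa [List.replicate_succ, PySem.Set.add] using ih

theorem pvDedupRepl (n : Nat) :
    PySem.List.dedup (List.replicate n "points") = if n = 0 then [] else ["points"] := by
  cases n with
  | zero => rfl
  | succ k =>
    simp only [PySem.List.dedup, PySem.Set.ofList, List.replicate_succ, Nat.succ_ne_zero]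
    simpa [PySem.Set.add] using pvSetAux k

-- ===== VERDICT (by name: the statement is the Claim_ definition above) =====
theorem topics_from_sensors_py_spec : Claim_equal_topics_from_sensors_py := by
  intro sensors _
  unfold Spec_topics_from_sensors_py topics_from_sensors_py topics_from_sensors_py_alt
  have hstep : (fun (topics : List String) (sensor : String) =>
      match (PySem.Dict.ofList [("lidar", "points"), ("points", "points"), ("gantry_lidar", "points")]).get? (PySem.Str.lower sensor) with
      | some topic => if topic ≠ "" then topics ++ [topic] else topics
      | none => topics)
      = (fun acc s => if pvQ s then acc ++ ["points"] else acc) :=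
    funext fun acc => funext fun s => pvStepA_eq acc s
  simp only [hstep, pvFoldB, List.nil_append, pvDedupRepl]
  rcases h : sensors.any (fun sensor => ["lidar", "points", "gantry_lidar"].contains (PySem.Str.lower sensor)) with _ | _
  · have : sensors.countP pvQ = 0 := by
      rw [List.countP_eq_zero]
      intro a ha
      have := List.any_eq_false.mp h a ha
      simpa [pvQ] using this
    simp [this]
  · obtain ⟨a, ha, hq⟩ := List.any_eq_true.mp h
    have : 0 < sensors.countP pvQ := List.countP_pos_iff.mpr ⟨a, ha, by simpa [pvQ] using hq⟩
    simp [Nat.pos_iff_ne_zero.mp this]
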